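-- pv_equiv track=rewrite | github.com/yashwanth1k996/Computational-Programming-Course | 09-shortenlongruns-Python/shortenlongruns.py | shortenlongruns
-- ===== SOURCE A (Python) =====
-- def shortenlongruns(L, k):
-- 	# Your code goes here
-- 	list1 = []
-- 	count = 0
-- 	val = 0
-- 	for i in range(0, len(L)):
-- 		if(L[i] == 0):
-- 			list1.append(L[i])
-- 			val = L[i]
-- 			count = 1
-- 		else:
-- 			if(L[i] == val):
-- 				count += 1
-- 				if(count < k):
-- 					list1.append(L[i])
-- 			else:
-- 				val = L[i]
-- 				list1.append(L[i])
-- 				count = 1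
-- 	return list1
-- ===== SOURCE B (Python) =====
-- def shortenlongruns(L, k):
--     # Run-length encode first, then emit each run with a closed-form kept count.
--     runs = []
--     for x in L:
--         if runs and runs[-1][0] == x:
--             runs[-1][1] += 1
--         else:
--             runs.append([x, 1])
--     out = []
--     for v, n in runs:
--         keep = n if v == 0 else 1 + max(0, min(n - 1, k - 2))
--         out.extend([v] * keep)
--     return out
-- ===== Notes on version B (the rewrite author's own statement) =====
-- stated objective: alternative
-- what changed: B run-length-encodes the list in one grouping pass and emits each run at once with a closed-form kept count (runs of 0 kept whole, as in A's zero branch; other runs keep 1 + max(0, min(n-1, k-2)) elements), replacing A's per-element counter/val/append state machine.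
import Mathlib
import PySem

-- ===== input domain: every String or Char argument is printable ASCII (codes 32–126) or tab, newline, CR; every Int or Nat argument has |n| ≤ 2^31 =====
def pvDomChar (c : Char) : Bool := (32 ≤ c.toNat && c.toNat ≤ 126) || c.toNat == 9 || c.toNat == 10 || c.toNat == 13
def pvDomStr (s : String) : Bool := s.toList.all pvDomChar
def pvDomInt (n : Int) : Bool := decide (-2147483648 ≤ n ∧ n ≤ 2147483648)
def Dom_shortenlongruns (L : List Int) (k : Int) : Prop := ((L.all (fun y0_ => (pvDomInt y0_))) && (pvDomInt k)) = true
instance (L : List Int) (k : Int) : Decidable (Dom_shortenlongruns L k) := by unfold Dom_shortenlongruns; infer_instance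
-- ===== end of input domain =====

-- B run-length-encodes the list and emits each run with a closed-form kept count,
-- replacing A's per-element counter state machine (objective: alternative decomposition).

-- ===== PORT A =====
-- loop state = (list1, count, val); one step per iteration, branches in A's order
def pvStepA (k : Int) (s : List Int × Int × Int) (x : Int) : List Int × Int × Int :=
  if x = 0 then (s.1 ++ [x], 1, x)
  else
    if x = s.2.2 then
      (if s.2.1 + 1 < k then s.1 ++ [x] else s.1, s.2.1 + 1, s.2.2)
    else (s.1 ++ [x], 1, x)

def shortenlongruns (L : List Int) (k : Int) : List Int :=
  (L.foldl (pvStepA k) ([], 0, 0)).1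

-- ===== PORT B =====
-- Source B's first loop: runs[-1][1] += 1 on an equal value, else runs.append([x, 1])
def pvAddRun (runs : List (Int × Int)) (x : Int) : List (Int × Int) :=
  match runs.getLast? with
  | some (v, n) => if v = x then runs.dropLast ++ [(v, n + 1)] else runs ++ [(x, 1)]
  | none => [(x, 1)]

-- keep = n if v == 0 else 1 + max(0, min(n - 1, k - 2))
def pvKeep (v n k : Int) : Int :=
  if v = 0 then n else 1 + max 0 (min (n - 1) (k - 2))

-- Source B's second loop: out.extend([v] * keep)
def pvEmit (runs : List (Int × Int)) (k : Int) : List Int :=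
  runs.foldl (fun out r => out ++ List.replicate (pvKeep r.1 r.2 k).toNat r.1) []

def shortenlongruns_alt (L : List Int) (k : Int) : List Int :=
  pvEmit (L.foldl pvAddRun []) k

-- ===== PRECONDITION & SPEC =====
def Spec_shortenlongruns (L : List Int) (k : Int) (out : List Int) : Prop := out = shortenlongruns_alt L k
instance (L : List Int) (k : Int) (out : List Int) : Decidable (Spec_shortenlongruns L k out) := by unfold Spec_shortenlongruns; infer_instance

-- ===== CLAIM (what is proved, stated in full; the proofs are below) =====
def Claim_equal_shortenlongruns : Prop := ∀ (L : List Int) (k : Int), Dom_shortenlongruns L k → Spec_shortenlongruns L k (shortenlongruns L k)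

-- ===== LEMMAS AND PROOFS =====

theorem pvEmit_append (runs : List (Int × Int)) (v n k : Int) :
    pvEmit (runs ++ [(v, n)]) k = pvEmit runs k ++ List.replicate (pvKeep v n k).toNat v := by
  unfold pvEmit
  rw [PySem.List.foldl_append_eq_flatMap, PySem.List.foldl_append_eq_flatMap]
  simp

-- invariant tying A's loop state to B's run list
def pvInv (k : Int) (runs : List (Int × Int)) (s : List Int × Int × Int) : Prop :=
  s.1 = pvEmit runs k ∧
  (match runs.getLast? with
   | none => s.2.1 = 0 ∧ s.2.2 = 0 ∧ runs = []
   | some (v, n) => s.2.2 = v ∧ s.2.1 = (if v = 0 then 1 else n) ∧ 1 ≤ n)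

theorem pvKeep_one (x k : Int) :
    List.replicate (pvKeep x 1 k).toNat x = [x] := by
  have h : (pvKeep x 1 k).toNat = 1 := by unfold pvKeep; split_ifs <;> omega
  rw [h]; rfl

theorem pvKeep_zero_succ (n k : Int) (hn : 1 ≤ n) :
    List.replicate (pvKeep 0 n k).toNat (0 : Int) ++ [(0 : Int)] =
      List.replicate (pvKeep 0 (n + 1) k).toNat 0 := by
  have h : (pvKeep 0 (n + 1) k).toNat = (pvKeep 0 n k).toNat + 1 := by
    unfold pvKeep; split_ifs <;> omega
  rw [h, List.replicate_add]
  simp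

theorem pvKeep_succ (v n k : Int) (hv : v ≠ 0) (hn : 1 ≤ n) :
    List.replicate (pvKeep v n k).toNat v ++ (if n + 1 < k then [v] else []) =
      List.replicate (pvKeep v (n + 1) k).toNat v := by
  have h : (pvKeep v (n + 1) k).toNat
      = (pvKeep v n k).toNat + (if n + 1 < k then 1 else 0) := by
    unfold pvKeep; split_ifs <;> omega
  rw [h]
  split_ifs <;> simp [List.replicate_add]

theorem pvInv_step (k : Int) (runs : List (Int × Int)) (s : List Int × Int × Int) (x : Int)
    (h : pvInv k runs s) : pvInv k (pvAddRun runs x) (pvStepA k s x) := by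
  obtain ⟨l1, c, vl⟩ := s
  obtain ⟨h1, h2⟩ := h
  simp only at h1
  rcases hlast : runs.getLast? with _ | ⟨v, n⟩
  · -- runs is empty: the first element starts a new run, both sides append [x]
    rw [hlast] at h2
    obtain ⟨hc, hv, hr⟩ := h2
    simp only at hc hv
    subst hr hc hv
    have hA : pvAddRun [] x = [(x, 1)] := by rfl
    have hS : pvStepA k (l1, 0, 0) x = (l1 ++ [x], 1, x) := by
      unfold pvStepA
      by_cases hx : x = 0 <;> simp [hx]
    rw [hA, hS]
    refine ⟨?_, ?_⟩
    · have he : pvEmit [(x, 1)] k = [] ++ List.replicate (pvKeep x 1 k).toNat x :=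
        pvEmit_append [] x 1 k
      rw [he, pvKeep_one]
      simp [h1, pvEmit]
    · simp only [List.getLast?_singleton]
      exact ⟨by trivial, by split_ifs <;> rfl, by omega⟩
  · rw [hlast] at h2
    obtain ⟨hval, hcount, hn⟩ := h2
    simp only at hval hcount
    subst hval
    have hne : runs ≠ [] := by intro hrr; rw [hrr] at hlast; simp at hlast
    have hsplit : runs.dropLast ++ [(vl, n)] = runs := by
      have h3 := List.dropLast_append_getLast hne
      have h4 : runs.getLast hne = (vl, n) := by
        have h5 := List.getLast?_eq_some_getLast (l := runs) hne
        rw [h5] at hlast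
        exact Option.some.inj hlast
      rw [h4] at h3; exact h3
    have hEmit : pvEmit runs k
        = pvEmit runs.dropLast k ++ List.replicate (pvKeep vl n k).toNat vl := by
      conv_lhs => rw [← hsplit]
      exact pvEmit_append _ vl n k
    by_cases hx : x = 0
    · subst hx
      have hS : pvStepA k (l1, c, vl) (0 : Int) = (l1 ++ [0], 1, 0) := by
        unfold pvStepA; simp
      rw [hS]
      by_cases hv0 : vl = 0
      · -- a further zero extends the zero run
        subst hv0
        have hA : pvAddRun runs 0 = runs.dropLast ++ [((0 : Int), n + 1)] := by
          unfold pvAddRun; rw [hlast]; simp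
        rw [hA]
        refine ⟨?_, ?_⟩
        · rw [pvEmit_append, h1, hEmit, List.append_assoc, pvKeep_zero_succ n k hn]
        · simp only [List.getLast?_concat]
          exact ⟨by trivial, by split_ifs <;> omega, by omega⟩
      · -- zero after a nonzero run: a new run starts
        have hA : pvAddRun runs 0 = runs ++ [((0 : Int), 1)] := by
          unfold pvAddRun; rw [hlast]; simp [hv0]
        rw [hA]
        refine ⟨?_, ?_⟩
        · rw [pvEmit_append, h1, pvKeep_one]
        · simp only [List.getLast?_concat]
          exact ⟨by trivial, by split_ifs <;> omega, by omega⟩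
    · by_cases hvx : x = vl
      · -- same nonzero value: the current run grows by one
        subst hvx
        have hcn : c = n := by rw [hcount, if_neg hx]
        subst hcn
        have hA : pvAddRun runs x = runs.dropLast ++ [(x, c + 1)] := by
          unfold pvAddRun; rw [hlast]; simp
        have hS : pvStepA k (l1, c, x) x
            = (if c + 1 < k then l1 ++ [x] else l1, c + 1, x) := by
          unfold pvStepA; rw [if_neg hx, if_pos rfl]
        rw [hA, hS]
        refine ⟨?_, ?_⟩
        · simp only
          rw [h1, hEmit, pvEmit_append, ← pvKeep_succ x c k hx hn, ← List.append_assoc]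
          split_ifs <;> simp
        · simp only [List.getLast?_concat]
          exact ⟨by trivial, by split_ifs <;> omega, by omega⟩
      · -- different nonzero value: a new run starts
        have hA : pvAddRun runs x = runs ++ [(x, 1)] := by
          unfold pvAddRun; rw [hlast]; simp
          exact fun h => absurd (Eq.symm h) hvx
        have hS : pvStepA k (l1, c, vl) x = (l1 ++ [x], 1, x) := by
          unfold pvStepA; rw [if_neg hx, if_neg hvx]
        rw [hA, hS]
        refine ⟨?_, ?_⟩
        · rw [pvEmit_append, h1, pvKeep_one]
        · simp only [List.getLast?_concat]
          exact ⟨by trivial, by split_ifs <;> omega, by omega⟩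

theorem pvInv_fold (k : Int) :
    ∀ (L : List Int) (runs : List (Int × Int)) (s : List Int × Int × Int),
      pvInv k runs s → pvInv k (L.foldl pvAddRun runs) (L.foldl (pvStepA k) s) := by
  intro L
  induction L with
  | nil => intro _ _ h; exact h
  | cons x L ih => intro runs s h; exact ih _ _ (pvInv_step k runs s x h)

-- ===== VERDICT (by name: the statement is the Claim_ definition above) =====
theorem shortenlongruns_spec : Claim_equal_shortenlongruns := by
  intro L k _
  unfold Spec_shortenlongruns shortenlongruns shortenlongruns_alt
  have h0 : pvInv k [] ([], 0, 0) := ⟨by simp [pvEmit], by simp⟩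
  exact (pvInv_fold k L [] ([], 0, 0) h0).1
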